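-- pv_equiv track=rewrite | github.com/ase2026participant/ASE-2026 | Assertion-Utility/SSA-Variable_Gen/ssa_analyzer/ssa_analyzer/derived_naming.py | extract_line_number
-- ===== SOURCE A (Python) =====
-- from typing import List, Dict, Tuple, Optional, Set
--
-- def extract_line_number(line: str, func_lines: List[str], func_start_index: int, all_lines: List[str]) -> int:
--     """
--     Extract line number for a given line within a function.
--
--     Args:
--         line: The line content
--         func_lines: Lines of the function body
--         func_start_index: Index in all_lines where function starts
--         all_lines: All lines from the source file
--
--     Returns:
--         Line number (1-indexed)
--     """
--     # Find the index of this line within the function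
--     try:
--         func_index = func_lines.index(line)
--         # Calculate absolute line number
--         return func_start_index + func_index + 1
--     except ValueError:
--         # Fallback: try to find similar line
--         for i, l in enumerate(func_lines):
--             if line.strip() in l or l.strip() in line:
--                 return func_start_index + i + 1
--         return func_start_index + 1
-- ===== SOURCE B (Python) =====
-- from typing import List
--
-- def extract_line_number(line: str, func_lines: List[str], func_start_index: int, all_lines: List[str]) -> int:
--     fallback_idx = None
--     for i, l in enumerate(func_lines):
--         if l == line:
--             return func_start_index + i + 1
--         if fallback_idx is None and (line.strip() in l or l.strip() in line):
--             fallback_idx = i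
--     if fallback_idx is not None:
--         return func_start_index + fallback_idx + 1
--     return func_start_index + 1
-- ===== Notes on version B (the rewrite author's own statement) =====
-- stated objective: alternative
-- what changed: Replaced the two-pass try/except structure (list.index then a separate fallback scan) by a single enumerate pass that returns on the first exact match and records the first substring match in one fallback variable.
import Mathlib
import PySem

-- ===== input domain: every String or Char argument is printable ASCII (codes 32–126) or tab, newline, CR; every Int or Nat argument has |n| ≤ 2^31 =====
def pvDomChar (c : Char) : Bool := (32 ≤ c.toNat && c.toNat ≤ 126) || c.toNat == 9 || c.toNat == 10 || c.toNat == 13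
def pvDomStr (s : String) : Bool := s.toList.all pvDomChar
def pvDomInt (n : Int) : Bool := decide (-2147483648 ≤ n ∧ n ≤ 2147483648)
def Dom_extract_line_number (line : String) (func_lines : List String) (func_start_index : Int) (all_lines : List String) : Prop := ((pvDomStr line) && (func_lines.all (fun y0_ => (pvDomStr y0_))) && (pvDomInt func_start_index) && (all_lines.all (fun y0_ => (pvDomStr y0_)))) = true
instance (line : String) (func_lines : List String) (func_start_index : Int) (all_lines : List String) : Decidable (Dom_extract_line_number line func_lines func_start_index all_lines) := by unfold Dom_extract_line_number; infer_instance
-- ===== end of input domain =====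

-- B: one enumerate pass with a recorded fallback index instead of A's list.index + separate fallback scan (alternative decomposition, same cost).

-- ===== PORT A =====
-- the substring predicate 'line.strip() in l or l.strip() in line'
def pvSimilar (line l : String) : Bool :=
  PySem.Str.isIn (PySem.Str.strip line) l || PySem.Str.isIn (PySem.Str.strip l) line

-- A's fallback loop: 'for i, l in enumerate(func_lines): if similar: return i' (absolute index carried in)
def aFallback (line : String) : List String → Nat → Option Nat
  | [], _ => none
  | l :: ls, i => if pvSimilar line l then some i else aFallback line ls (i + 1)

def extract_line_number (line : String) (func_lines : List String) (func_start_index : Int) (all_lines : List String) : Int :=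
  match PySem.List.index? func_lines line with
  | some i => func_start_index + (i : Int) + 1
  | none =>
    match aFallback line func_lines 0 with
    | some i => func_start_index + (i : Int) + 1
    | none => func_start_index + 1

-- ===== PORT B =====
-- single pass: return on first exact match, record first substring match in fb
def bGo (line : String) (func_start_index : Int) : List String → Nat → Option Nat → Int
  | [], _, fb =>
    match fb with
    | some j => func_start_index + (j : Int) + 1
    | none => func_start_index + 1
  | l :: ls, i, fb =>
    if l == line then func_start_index + (i : Int) + 1
    else bGo line func_start_index ls (i + 1)
      (if fb.isNone && pvSimilar line l then some i else fb)

def extract_line_number_alt (line : String) (func_lines : List String) (func_start_index : Int) (all_lines : List String) : Int :=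
  bGo line func_start_index func_lines 0 none

-- ===== PRECONDITION & SPEC =====
def Spec_extract_line_number (line : String) (func_lines : List String) (func_start_index : Int) (all_lines : List String) (out : Int) : Prop := out = extract_line_number_alt line func_lines func_start_index all_lines
instance (line : String) (func_lines : List String) (func_start_index : Int) (all_lines : List String) (out : Int) : Decidable (Spec_extract_line_number line func_lines func_start_index all_lines out) := by unfold Spec_extract_line_number; infer_instance

-- ===== CLAIM (what is proved, stated in full; the proofs are below) =====
def Claim_equal_extract_line_number : Prop := ∀ (line : String) (func_lines : List String) (func_start_index : Int) (all_lines : List String), Dom_extract_line_number line func_lines func_start_index all_lines → Spec_extract_line_number line func_lines func_start_index all_lines (extract_line_number line func_lines func_start_index all_lines)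

-- ===== LEMMAS AND PROOFS =====

-- the single pass unrolled: exact match wins, else the recorded fallback, else A's fallback scan
theorem bGo_eq (line : String) (fsi : Int) (ls : List String) :
    ∀ (i : Nat) (fb : Option Nat),
      bGo line fsi ls i fb =
        match PySem.List.index? ls line with
        | some j => fsi + ((i + j : Nat) : Int) + 1
        | none =>
          match fb with
          | some k => fsi + (k : Int) + 1
          | none =>
            match aFallback line ls i with
            | some m => fsi + (m : Int) + 1
            | none => fsi + 1 := by
  induction ls with
  | nil => intro i fb; rfl
  | cons l ls ih =>
    intro i fb
    by_cases h : l == line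
    · have hv : l = line := by exact eq_of_beq h
      subst hv
      rw [PySem.List.index?_cons_self]
      simp [bGo]
    · have hne : l ≠ line := fun hv => h (by simp [hv])
      rw [PySem.List.index?_cons_of_ne ls hne]
      simp only [bGo, h, Bool.false_eq_true, if_false]
      rw [ih]
      cases hidx : PySem.List.index? ls line with
      | some j =>
        simp only [Option.map_some]
        have : i + 1 + j = i + (j + 1) := by omega
        rw [this]
      | none =>
        simp only [Option.map_none]
        cases fb with
        | some k => simp
        | none =>
          simp only [Option.isNone_none, Bool.true_and, aFallback]
          by_cases hs : pvSimilar line l <;> simp [hs]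

theorem extract_line_number_spec : Claim_equal_extract_line_number := by
  intro line func_lines fsi all_lines _
  unfold Spec_extract_line_number extract_line_number extract_line_number_alt
  rw [bGo_eq]
  cases PySem.List.index? func_lines line with
  | some j => simp
  | none => rfl
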